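-- pv_equiv track=rewrite | github.com/Radoslaw-Wolnik/Kryptografia | 07_RSA_/test_AKS.py | coef
-- ===== SOURCE A (Python) =====
-- def coef(n):
--     c = []
--     c.append(1)
--     for i in range(n):
--         c.append(1)
--         for j in range(i, 0, -1):
--             c[j] = c[j - 1] - c[j]
--         c[0] = -c[0]
--     return c
-- ===== SOURCE B (Python) =====
-- def coef(n):
--     if n <= 0:
--         return [1]
--     out = []
--     b = 1
--     for k in range(n + 1):
--         out.append(-b if (n - k) % 2 else b)
--         b = b * (n - k) // (k + 1)
--     return out
-- ===== Notes on version B (the rewrite author's own statement) =====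
-- stated objective: faster
-- what changed: Replaces the O(n^2) in-place Pascal-style update loop by a single pass that emits signed binomial coefficients via the multiplicative recurrence C(n,k+1)=C(n,k)*(n-k)//(k+1).
import Mathlib
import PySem

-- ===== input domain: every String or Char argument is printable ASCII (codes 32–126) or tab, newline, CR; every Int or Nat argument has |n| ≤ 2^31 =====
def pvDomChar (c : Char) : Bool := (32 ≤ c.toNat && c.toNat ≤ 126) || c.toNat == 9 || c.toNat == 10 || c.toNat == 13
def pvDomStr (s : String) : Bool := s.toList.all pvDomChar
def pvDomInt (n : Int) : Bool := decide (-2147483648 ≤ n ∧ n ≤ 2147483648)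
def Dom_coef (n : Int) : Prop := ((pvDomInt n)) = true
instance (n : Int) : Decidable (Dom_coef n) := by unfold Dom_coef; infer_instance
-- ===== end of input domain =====

-- B replaces A's O(n^2) in-place Pascal-style update loop by a single O(n) pass emitting
-- signed binomials via the multiplicative recurrence C(n,k+1) = C(n,k)*(n-k)//(k+1).

-- ===== PORT A =====
-- body of 'for i in range(n)': c.append(1); for j in range(i,0,-1): c[j] = c[j-1] - c[j]; c[0] = -c[0]
-- (indices j, j-1, 0 are always in range here, so pySetD/pyGetD are exact)
def coefStep (c : List Int) (i : Int) : List Int :=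
  let c1 := c ++ [1]
  let c2 := (PySem.List.pyRange i 0 (-1)).foldl
    (fun c j => PySem.List.pySetD c j (PySem.List.pyGetD c (j - 1) 0 - PySem.List.pyGetD c j 0)) c1
  PySem.List.pySetD c2 0 (-(PySem.List.pyGetD c2 0 0))

def coef (n : Int) : List Int :=
  (PySem.List.pyRange 0 n 1).foldl coefStep [1]

-- ===== PORT B =====
-- body of 'for k in range(n+1)': out.append(-b if (n-k)%2 else b); b = b*(n-k)//(k+1)
def coefAltStep (n : Int) (st : List Int × Int) (k : Int) : List Int × Int :=
  (st.1 ++ [if PySem.Int.mod (n - k) 2 ≠ 0 then -st.2 else st.2],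
   PySem.Int.floordiv (st.2 * (n - k)) (k + 1))

def coef_alt (n : Int) : List Int :=
  if n ≤ 0 then [1]
  else ((PySem.List.pyRange 0 (n + 1) 1).foldl (coefAltStep n) ([], 1)).1

-- ===== PRECONDITION & SPEC =====
def Spec_coef (n : Int) (out : List Int) : Prop := out = coef_alt n
instance (n : Int) (out : List Int) : Decidable (Spec_coef n out) := by unfold Spec_coef; infer_instance

-- ===== CLAIM (what is proved, stated in full; the proofs are below) =====
def Claim_equal_coef : Prop := ∀ (n : Int), Dom_coef n → Spec_coef n (coef n)

-- ===== LEMMAS AND PROOFS =====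

-- the common value: signed binomial coefficients of (x-1)^m
def specCoef (m : Nat) : List Int :=
  (List.range (m + 1)).map (fun j => (-1 : Int) ^ (m - j) * (m.choose j : Int))

theorem specCoef_zero : specCoef 0 = [1] := by decide

theorem getD_set (l : List Int) (n t : Nat) (v d : Int) :
    (l.set n v).getD t d = if t = n ∧ n < l.length then v else l.getD t d := by
  simp only [List.getD_eq_getElem?_getD, List.getElem?_set]
  by_cases h1 : n = t
  · subst h1
    by_cases h2 : n < l.length <;> simp [h2]
  · have hne : ¬(t = n ∧ n < l.length) := by omega
    rw [if_neg hne, if_neg h1]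
  

-- inner descending loop: simultaneous update formula
theorem inner_fold_eq (k : Nat) (c : List Int) (hk : k < c.length) :
    (PySem.List.pyRange (k : Int) 0 (-1)).foldl
      (fun c j => PySem.List.pySetD c j (PySem.List.pyGetD c (j - 1) 0 - PySem.List.pyGetD c j 0)) c
    = (List.range c.length).map
        (fun j => if 1 ≤ j ∧ j ≤ k then c.getD (j - 1) 0 - c.getD j 0 else c.getD j 0) := by
  induction k generalizing c with
  | zero =>
      rw [PySem.List.pyRange_neg_one_eq_nil (by norm_num), List.foldl_nil]
      apply List.ext_getElem (by simp)
      intro j h1 h2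
      simp only [List.getElem_map, List.getElem_range]
      rw [if_neg (by omega)]
      exact (List.getD_eq_getElem c 0 h1).symm
  | succ k ih =>
      rw [PySem.List.pyRange_neg_one_cons (show (0:Int) < ((k+1 : Nat) : Int) by positivity),
          List.foldl_cons]
      simp only [show ((k+1 : Nat) : Int) - 1 = ((k : Nat) : Int) from by push_cast; ring,
                 PySem.List.pySetD_natCast, PySem.List.pyGetD_natCast]
      rw [ih _ (by simp; omega)]
      apply List.ext_getElem (by simp)
      intro j h1 h2
      simp only [List.getElem_map, List.getElem_range, List.length_set] at h1 h2 ⊢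
      by_cases hj : j = k + 1
      · subst hj
        rw [if_neg (by omega), if_pos (by omega), getD_set, if_pos ⟨rfl, hk⟩]
        congr 1
      · by_cases hj2 : 1 ≤ j ∧ j ≤ k
        · rw [if_pos hj2, if_pos (by omega), getD_set, if_neg (by omega), getD_set,
              if_neg (by omega)]
        · rw [if_neg hj2, if_neg (by omega), getD_set, if_neg (by omega)]

theorem sign_pascal (i j : Nat) (h1 : 1 ≤ j) (h2 : j ≤ i) :
    (-1:Int)^(i-(j-1)) * (i.choose (j-1) : Int) - (-1:Int)^(i-j) * (i.choose j : Int)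
    = (-1:Int)^(i+1-j) * (((i+1).choose j : Nat) : Int) := by
  have hch : (((i+1).choose j : Nat) : Int) = (i.choose (j-1) : Int) + (i.choose j : Int) := by
    have h := Nat.choose_succ_succ i (j - 1)
    simp only [Nat.succ_eq_add_one] at h
    rw [show j - 1 + 1 = j by omega] at h
    rw [h]; push_cast; ring
  rw [hch, show i + 1 - j = (i - j) + 1 by omega, show i - (j - 1) = (i - j) + 1 by omega,
      pow_succ]
  ring

theorem coefStep_spec (i : Nat) : coefStep (specCoef i) (i : Int) = specCoef (i + 1) := by
  have hlen : (specCoef i).length = i + 1 := by simp [specCoef]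
  have hc1 : ∀ t : Nat, ((specCoef i ++ [1]).getD t 0 : Int) =
      if t ≤ i then (-1:Int)^(i-t) * (i.choose t : Int) else if t = i + 1 then 1 else 0 := by
    intro t
    by_cases ht : t ≤ i
    · rw [List.getD_append _ _ _ _ (by omega), if_pos ht,
          List.getD_eq_getElem _ _ (by omega)]
      simp [specCoef]
    · rw [List.getD_append_right _ _ _ _ (by omega), if_neg ht, hlen]
      by_cases ht2 : t = i + 1
      · subst ht2; simp
      · rw [if_neg ht2]
        exact List.getD_eq_default _ _ (by simp only [List.length_cons, List.length_nil]; omega)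
  simp only [coefStep]
  rw [inner_fold_eq i _ (by simp only [List.length_append, hlen]; omega)]
  have hlen2 : (specCoef i ++ [1]).length = i + 2 := by simp [hlen]
  rw [PySem.List.pyGetD_zero, PySem.List.pySetD_of_nonneg _ _ (le_refl (0:Int))]
  have hr0 : ((List.range (specCoef i ++ [1]).length).map
      (fun j => if 1 ≤ j ∧ j ≤ i then (specCoef i ++ [1]).getD (j-1) 0 - (specCoef i ++ [1]).getD j 0
                else (specCoef i ++ [1]).getD j 0)).getD 0 0 = (-1:Int)^i := by
    rw [List.getD_eq_getElem _ _ (by simp [hlen2])]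
    simp only [List.getElem_map, List.getElem_range]
    rw [if_neg (by omega), hc1 0, if_pos (by omega)]
    simp
  rw [hr0]
  apply List.ext_getElem (by simp [specCoef])
  intro j h1 h2
  have hj2 : j < i + 2 := by simpa [hlen2] using h1
  simp only [Int.toNat_zero, List.getElem_set, List.getElem_map, List.getElem_range]
  have hspec : (specCoef (i+1))[j] = (-1:Int)^(i+1-j) * (((i+1).choose j : Nat) : Int) := by
    simp [specCoef]
  rw [hspec]
  by_cases hj0 : j = 0
  · subst hj0
    rw [if_pos rfl]
    simp [pow_succ]
  · rw [if_neg (fun h => hj0 h.symm)]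
    by_cases hjm : 1 ≤ j ∧ j ≤ i
    · rw [if_pos hjm, hc1 (j-1), if_pos (by omega), hc1 j, if_pos (by omega)]
      exact sign_pascal i j hjm.1 hjm.2
    · have hje : j = i + 1 := by omega
      subst hje
      rw [if_neg hjm, hc1 (i+1), if_neg (by omega), if_pos rfl]
      simp

theorem coef_eq_spec (m : Nat) :
    (PySem.List.pyRange 0 (m : Int) 1).foldl coefStep [1] = specCoef m := by
  induction m with
  | zero => simp [specCoef_zero]
  | succ m ih =>
      have h : ((m + 1 : Nat) : Int) = (m : Int) + 1 := by push_cast; rfl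
      rw [h, PySem.List.pyRange_one_succ_right (by positivity), List.foldl_append, ih]
      simpa using coefStep_spec m

theorem alt_fold_eq (m k : Nat) (hk : k ≤ m + 1) :
    (PySem.List.pyRange 0 (k : Int) 1).foldl (coefAltStep (m : Int)) ([], 1)
    = ((List.range k).map (fun j => (-1 : Int) ^ (m - j) * (m.choose j : Int)),
       ((m.choose k : Nat) : Int)) := by
  induction k with
  | zero =>
      have h0 : PySem.List.pyRange 0 ((0 : Nat) : Int) 1 = [] :=
        PySem.List.pyRange_one_eq_nil (by norm_num)
      rw [h0]
      simp
  | succ k ih =>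
      have hkm : k ≤ m := by omega
      have hsub : ((m : Int) - (k : Int)) = ((m - k : Nat) : Int) := by
        push_cast [Nat.cast_sub hkm]; rfl
      rw [show ((k+1 : Nat) : Int) = ((k : Nat) : Int) + 1 from by push_cast; ring,
          PySem.List.pyRange_one_succ_right (by positivity), List.foldl_append,
          ih (by omega), List.foldl_cons, List.foldl_nil]
      unfold coefAltStep
      refine Prod.ext ?_ ?_
      · simp only [List.range_succ, List.map_append, List.map_cons, List.map_nil]
        congr 1
        rw [hsub, show (2:Int) = ((2:Nat):Int) from by norm_num, PySem.Int.mod_natCast]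
        rcases Nat.even_or_odd (m - k) with he | ho
        · rw [if_neg (by simp [Nat.even_iff.mp he]), he.neg_one_pow, one_mul]
        · rw [if_pos (by simp [Nat.odd_iff.mp ho]), ho.neg_one_pow]
          ring
      · simp only
        rw [hsub, show ((m.choose k : Nat) : Int) * ((m - k : Nat) : Int)
              = (((m.choose k) * (m - k) : Nat) : Int) from by push_cast; ring,
            show ((k : Nat) : Int) + 1 = ((k + 1 : Nat) : Int) from by push_cast; ring,
            ← Nat.choose_succ_right_eq, PySem.Int.floordiv_natCast,
            Nat.mul_div_cancel _ (by omega)]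

theorem coef_alt_eq_spec (n : Int) : coef_alt n = specCoef n.toNat := by
  unfold coef_alt
  by_cases h : n ≤ 0
  · rw [if_pos h, Int.toNat_of_nonpos h, specCoef_zero]
  · rw [if_neg h, show n = ((n.toNat : Nat) : Int) from by omega,
        show ((n.toNat : Nat) : Int) + 1 = ((n.toNat + 1 : Nat) : Int) from by push_cast; ring,
        alt_fold_eq n.toNat (n.toNat + 1) (le_refl _), Int.toNat_natCast]
    simp [specCoef]

-- ===== VERDICT (by name: the statement is the Claim_ definition above) =====
theorem coef_spec : Claim_equal_coef := by
  intro n _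
  unfold Spec_coef
  rw [coef_alt_eq_spec]
  unfold coef
  by_cases h : n ≤ 0
  · rw [PySem.List.pyRange_one_eq_nil h]
    simp [Int.toNat_of_nonpos h, specCoef_zero]
  · conv_lhs => rw [show n = ((n.toNat : Nat) : Int) by omega]
    exact coef_eq_spec n.toNat
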